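-- pv_equiv track=rewrite | github.com/bbismm/ibitlabs | mcp_brand_publishers/lobster_claw.py | _infix_pairs
-- ===== SOURCE A (Python) =====
-- NUMBER_WORDS: dict[str, int] = {
--     "zero": 0, "one": 1, "two": 2, "three": 3, "four": 4, "five": 5,
--     "six": 6, "seven": 7, "eight": 8, "nine": 9, "ten": 10,
--     "eleven": 11, "twelve": 12, "thirteen": 13, "fourteen": 14, "fifteen": 15,
--     "sixteen": 16, "seventeen": 17, "eighteen": 18, "nineteen": 19,
--     "twenty": 20, "thirty": 30, "forty": 40, "fifty": 50,
--     "sixty": 60, "seventy": 70, "eighty": 80, "ninety": 90,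
--     "hundred": 100, "thousand": 1000,
-- }
--
-- ADD_VERBS = {"gains", "adds", "plus"}
--
-- SUB_VERBS = {"loses", "drops", "molts", "slows"}
--
-- MUL_VERBS = {"times", "multiplied", "multiply", "multiplies"}
--
-- SEPARATORS = {"and"}
--
-- def _fold_compound(num_tokens: list[str]) -> int:
--     """
--     Fold a run of number words into a single integer.
--
--     Handles English compound forms:
--         "twenty one"        -> 21
--         "two hundred"       -> 200
--         "two hundred three" -> 203
--         "one thousand five hundred twenty one" -> 1521
--
--     Adjacent small-number words without a multiplier are summed conservatively:
--         "five seven" -> 12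
--     The challenge generator does not currently emit that pattern but the
--     parser stays defensive.
--     """
--     total = 0
--     current = 0
--     for w in num_tokens:
--         v = NUMBER_WORDS[w]
--         if v == 100 or v == 1000:
--             # multiplier: scale the current accumulator (or 1 if empty)
--             current = (current or 1) * v
--             if v == 1000:
--                 # "one thousand X hundred Y" — 1000 closes a magnitude block
--                 total += current
--                 current = 0
--         else:
--             current += v
--     return total + current
--
-- def _infix_pairs(tokens: list[str]) -> list[tuple[str, int]]:
--     """
--     Extract (op, value) pairs from a token list using infix parsing.
--     Returns [] if no number tokens are found.
--     """
--     pairs: list[tuple[str, int]] = []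
--     pending_op = "+"
--     buf: list[str] = []
--
--     def flush() -> None:
--         if buf:
--             pairs.append((pending_op, _fold_compound(buf)))
--             buf.clear()
--
--     for tok in tokens:
--         if tok in NUMBER_WORDS:
--             buf.append(tok)
--         elif tok in SEPARATORS:
--             continue
--         elif tok in ADD_VERBS or tok == "+":
--             flush()
--             pending_op = "+"
--         elif tok in SUB_VERBS:
--             flush()
--             pending_op = "-"
--         elif tok in MUL_VERBS or tok == "*":
--             flush()
--             pending_op = "*"
--     flush()
--     return pairs
-- ===== SOURCE B (Python) =====
-- # B: reverse-scan parser. A's forward pass needs a pending-operator state because an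
-- # operator labels the number run that FOLLOWS it. Scanning right-to-left removes that
-- # state entirely: each operator token emits the number run accumulated to its right,
-- # the leftover run at the end gets the implicit "+", and the pair list is built
-- # back-to-front and reversed once at the end.
--
-- NUMBER_WORDS: dict[str, int] = {
--     "zero": 0, "one": 1, "two": 2, "three": 3, "four": 4, "five": 5,
--     "six": 6, "seven": 7, "eight": 8, "nine": 9, "ten": 10,
--     "eleven": 11, "twelve": 12, "thirteen": 13, "fourteen": 14, "fifteen": 15,
--     "sixteen": 16, "seventeen": 17, "eighteen": 18, "nineteen": 19,
--     "twenty": 20, "thirty": 30, "forty": 40, "fifty": 50,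
--     "sixty": 60, "seventy": 70, "eighty": 80, "ninety": 90,
--     "hundred": 100, "thousand": 1000,
-- }
--
-- ADD_VERBS = {"gains", "adds", "plus"}
-- SUB_VERBS = {"loses", "drops", "molts", "slows"}
-- MUL_VERBS = {"times", "multiplied", "multiply", "multiplies"}
--
--
-- def _op_of(tok: str):
--     """Operator symbol introduced by this token, or None."""
--     if tok in ADD_VERBS or tok == "+":
--         return "+"
--     if tok in SUB_VERBS:
--         return "-"
--     if tok in MUL_VERBS or tok == "*":
--         return "*"
--     return None
--
--
-- def _fold_compound(num_tokens: list[str]) -> int: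
--     total = 0
--     current = 0
--     for w in num_tokens:
--         v = NUMBER_WORDS[w]
--         if v == 100 or v == 1000:
--             current = (current or 1) * v
--             if v == 1000:
--                 total += current
--                 current = 0
--         else:
--             current += v
--     return total + current
--
--
-- def _infix_pairs(tokens: list[str]) -> list[tuple[str, int]]:
--     rev_pairs: list[tuple[str, int]] = []
--     buf: list[str] = []  # number words to the right of the cursor, rightmost first
--     for tok in reversed(tokens):
--         o = _op_of(tok)
--         if o is not None:
--             if buf:
--                 rev_pairs.append((o, _fold_compound(buf[::-1])))
--                 buf = []
--         elif tok in NUMBER_WORDS: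
--             buf.append(tok)
--     if buf:
--         rev_pairs.append(("+", _fold_compound(buf[::-1])))
--     return rev_pairs[::-1]
-- ===== Notes on version B (the rewrite author's own statement) =====
-- stated objective: alternative
-- what changed: A scans left-to-right carrying a pending-operator plus a flush() closure; B scans the token list right-to-left with no pending-op state at all: each operator token emits the number run accumulated to its right, the leftover run takes the implicit '+', and the pair list is built back-to-front and reversed once.
import Mathlib
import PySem

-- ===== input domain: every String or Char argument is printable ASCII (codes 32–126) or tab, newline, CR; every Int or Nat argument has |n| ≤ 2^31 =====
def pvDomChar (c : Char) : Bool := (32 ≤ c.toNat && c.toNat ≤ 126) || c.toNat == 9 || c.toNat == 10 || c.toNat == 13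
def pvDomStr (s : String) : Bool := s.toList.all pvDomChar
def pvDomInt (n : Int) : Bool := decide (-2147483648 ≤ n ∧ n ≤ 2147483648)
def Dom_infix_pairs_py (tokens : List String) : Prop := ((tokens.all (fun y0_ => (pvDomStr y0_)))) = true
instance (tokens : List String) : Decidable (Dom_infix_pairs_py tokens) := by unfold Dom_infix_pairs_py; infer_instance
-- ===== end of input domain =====

-- B replaces A's forward scan with pending-operator state by a right-to-left scan in which
-- each operator token emits the number run to its right and the output is built back-to-front;
-- alternative decomposition, not faster.

-- shared module constants: NUMBER_WORDS as an association list (unique keys)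
def numberWords : List (String × Int) :=
  [("zero", 0), ("one", 1), ("two", 2), ("three", 3), ("four", 4), ("five", 5),
   ("six", 6), ("seven", 7), ("eight", 8), ("nine", 9), ("ten", 10),
   ("eleven", 11), ("twelve", 12), ("thirteen", 13), ("fourteen", 14), ("fifteen", 15),
   ("sixteen", 16), ("seventeen", 17), ("eighteen", 18), ("nineteen", 19),
   ("twenty", 20), ("thirty", 30), ("forty", 40), ("fifty", 50),
   ("sixty", 60), ("seventy", 70), ("eighty", 80), ("ninety", 90),
   ("hundred", 100), ("thousand", 1000)]

-- "tok in NUMBER_WORDS"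
def isNum (tok : String) : Bool := (numberWords.lookup tok).isSome

-- _fold_compound: NUMBER_WORDS[w] is always present at the call sites, so getD 0 is exact there
def foldCompound (numTokens : List String) : Int :=
  let r := numTokens.foldl
    (fun (s : Int × Int) w =>
      let v := (numberWords.lookup w).getD 0
      if v = 100 ∨ v = 1000 then
        let cur := (if s.2 ≠ 0 then s.2 else 1) * v   -- (current or 1) * v
        if v = 1000 then (s.1 + cur, 0) else (s.1, cur)
      else (s.1, s.2 + v))
    (0, 0)
  r.1 + r.2

-- ===== PORT A =====
-- the flush() closure: state is (pairs, pending_op, buf)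
def flushA (pairs : List (String × Int)) (op : String) (buf : List String) :
    List (String × Int) :=
  if buf = [] then pairs else pairs ++ [(op, foldCompound buf)]

def stepA (st : List (String × Int) × String × List String) (tok : String) :
    List (String × Int) × String × List String :=
  if isNum tok then (st.1, st.2.1, st.2.2 ++ [tok])
  else if tok = "and" then st
  else if tok ∈ ["gains", "adds", "plus"] ∨ tok = "+" then
    (flushA st.1 st.2.1 st.2.2, "+", ([] : List String))
  else if tok ∈ ["loses", "drops", "molts", "slows"] then
    (flushA st.1 st.2.1 st.2.2, "-", ([] : List String))
  else if tok ∈ ["times", "multiplied", "multiply", "multiplies"] ∨ tok = "*" then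
    (flushA st.1 st.2.1 st.2.2, "*", ([] : List String))
  else st

def infix_pairs_py (tokens : List String) : List (String × Int) :=
  let st := tokens.foldl stepA ([], "+", [])
  flushA st.1 st.2.1 st.2.2

-- ===== PORT B =====
def opOf (tok : String) : Option String :=
  if tok ∈ ["gains", "adds", "plus"] ∨ tok = "+" then some "+"
  else if tok ∈ ["loses", "drops", "molts", "slows"] then some "-"
  else if tok ∈ ["times", "multiplied", "multiply", "multiplies"] ∨ tok = "*" then some "*"
  else none

-- one step of B's reverse scan: state is (rev_pairs, buf) with buf rightmost-first
def stepB (st : List (String × Int) × List String) (tok : String) :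
    List (String × Int) × List String :=
  match opOf tok with
  | some o => if st.2 ≠ [] then (st.1 ++ [(o, foldCompound st.2.reverse)], []) else st
  | none => if isNum tok then (st.1, st.2 ++ [tok]) else st

def infix_pairs_py_alt (tokens : List String) : List (String × Int) :=
  let st := tokens.reverse.foldl stepB ([], [])
  (if st.2 ≠ [] then st.1 ++ [("+", foldCompound st.2.reverse)] else st.1).reverse

-- ===== PRECONDITION & SPEC =====
def Spec_infix_pairs_py (tokens : List String) (out : List (String × Int)) : Prop := out = infix_pairs_py_alt tokens
instance (tokens : List String) (out : List (String × Int)) : Decidable (Spec_infix_pairs_py tokens out) := by unfold Spec_infix_pairs_py; infer_instance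

-- ===== CLAIM (what is proved, stated in full; the proofs are below) =====
def Claim_equal_infix_pairs_py : Prop := ∀ (tokens : List String), Dom_infix_pairs_py tokens → Spec_infix_pairs_py tokens (infix_pairs_py tokens)

-- ===== LEMMAS AND PROOFS =====

-- common reference spec: pairs produced from pending op `op`, buffer `buf`, remaining tokens
def specF (op : String) (buf : List String) : List String → List (String × Int)
  | [] => if buf = [] then [] else [(op, foldCompound buf)]
  | t :: ts =>
    if isNum t then specF op (buf ++ [t]) ts
    else match opOf t with
      | some o => (if buf = [] then [] else [(op, foldCompound buf)]) ++ specF o [] ts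
      | none => specF op buf ts

theorem stepA_eq (st : List (String × Int) × String × List String) (tok : String) :
    stepA st tok =
      if isNum tok then (st.1, st.2.1, st.2.2 ++ [tok])
      else
        match opOf tok with
        | some o => (flushA st.1 st.2.1 st.2.2, o, ([] : List String))
        | none => st := by
  by_cases hn : isNum tok = true
  · simp [stepA, hn]
  · by_cases ha : tok = "and"
    · subst ha; simp [stepA, opOf, hn]
    · simp only [stepA, opOf, if_neg hn, if_neg ha]
      split_ifs <;> rfl

theorem op_isNum_false (tok o : String) (h : opOf tok = some o) : isNum tok = false := by
  have hmem : tok ∈ ["gains", "adds", "plus", "+", "loses", "drops", "molts", "slows",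
      "times", "multiplied", "multiply", "multiplies", "*"] := by
    unfold opOf at h
    split_ifs at h with h1 h2 h3 <;> injection h with h <;> subst h <;> simp_all <;> tauto
  fin_cases hmem <;> rfl

-- A's fold computes specF
theorem keyA (tokens : List String) :
    ∀ (pairs : List (String × Int)) (op : String) (buf : List String),
      flushA (List.foldl stepA (pairs, op, buf) tokens).1
          (List.foldl stepA (pairs, op, buf) tokens).2.1
          (List.foldl stepA (pairs, op, buf) tokens).2.2
        = pairs ++ specF op buf tokens := by
  induction tokens with
  | nil => intro pairs op buf; simp [flushA, specF]; split_ifs <;> simp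
  | cons t ts ih =>
    intro pairs op buf
    simp only [List.foldl_cons, stepA_eq]
    by_cases hn : isNum t = true
    · simp only [hn, if_true, specF]
      exact ih pairs op (buf ++ [t])
    · have hn' : isNum t = false := by simpa using hn
      cases hop : opOf t with
      | none => simp only [hn', Bool.false_eq_true, if_false, specF, hop]; exact ih pairs op buf
      | some o =>
        simp only [hn', Bool.false_eq_true, if_false, hop, specF]
        rw [ih]
        unfold flushA
        by_cases hb : buf = [] <;> simp [hb]

-- B's reverse scan as structural recursion on the (unreversed) token list
def gB : List String → List (String × Int) × List String
  | [] => ([], [])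
  | t :: ts => stepB (gB ts) t

theorem gB_eq_foldl (tokens : List String) :
    tokens.reverse.foldl stepB ([], []) = gB tokens := by
  induction tokens with
  | nil => rfl
  | cons t ts ih => simp [gB, List.reverse_cons, List.foldl_append, ih]

-- B's finishing step, generalized over a pending buffer `pre` (in left-to-right order)
def finishW (op : String) (pre : List String) (st : List (String × Int) × List String) :
    List (String × Int) :=
  (if pre ++ st.2.reverse = [] then [] else [(op, foldCompound (pre ++ st.2.reverse))]) ++
    st.1.reverse

theorem keyB (tokens : List String) :
    ∀ (op : String) (pre : List String),
      finishW op pre (gB tokens) = specF op pre tokens := by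
  induction tokens with
  | nil => intro op pre; simp [gB, finishW, specF]
  | cons t ts ih =>
    intro op pre
    show finishW op pre (stepB (gB ts) t) = specF op pre (t :: ts)
    cases hop : opOf t with
    | some o =>
      have hn : isNum t = false := op_isNum_false t o hop
      simp only [specF, hn, Bool.false_eq_true, if_false, hop]
      rw [← ih o []]
      unfold stepB finishW
      rw [hop]
      by_cases hb : (gB ts).2 = []
      · simp [hb]
      · simp [hb]
    | none =>
      by_cases hn : isNum t = true
      · simp only [specF, hn, if_true]
        rw [← ih op (pre ++ [t])]
        unfold stepB finishW
        rw [hop]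
        simp [hn]
      · have hn' : isNum t = false := by simpa using hn
        simp only [specF, hn', Bool.false_eq_true, if_false, hop]
        rw [← ih op pre]
        unfold stepB finishW
        rw [hop]
        simp [hn']

-- ===== VERDICT (by name: the statement is the Claim_ definition above) =====
theorem infix_pairs_py_spec : Claim_equal_infix_pairs_py := by
  intro tokens _
  unfold Spec_infix_pairs_py
  have hA := keyA tokens [] "+" []
  have hB := keyB tokens "+" []
  simp only [List.nil_append] at hA
  rw [infix_pairs_py, infix_pairs_py_alt, hA, gB_eq_foldl, ← hB]
  unfold finishW
  by_cases hb : ((gB tokens).2 : List String) = [] <;> simp [hb]
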